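-- pv_equiv track=rewrite | github.com/suparna-here-123/AoC_2024 | 2023/Day_1.py | puzzleTwo
-- ===== SOURCE A (Python) =====
-- def puzzleTwo(puzzleInput) :
--     res = 0
--     first, last = None, None
--     words = ['one', 'two', 'three', 'four', 'five', 'six', 'seven', 'eight', 'nine']
--     for line in puzzleInput :
--         digits = []
--         for i, c in enumerate(line) :
--             if c.isdigit() :
--                 digits.append(int(c))
--             else :
--                 if c in 'otfsen' :
--                     for val, word in enumerate(words, start=1):
--                         if line[i : ].startswith(word) :
--                             digits.append(val)
--                             break
--         res += (10 * digits[0]) + digits[-1]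
--     return res
-- ===== SOURCE B (Python) =====
-- def puzzleTwo(puzzleInput):
--     words = ['one', 'two', 'three', 'four', 'five', 'six', 'seven', 'eight', 'nine']
--     res = 0
--     for line in puzzleInput:
--         def tok(i):
--             c = line[i]
--             if c.isdigit():
--                 return int(c)
--             for v, w in enumerate(words, 1):
--                 if line.startswith(w, i):
--                     return v
--             return None
--         first = next(v for i in range(len(line)) if (v := tok(i)) is not None)
--         last = next(v for i in reversed(range(len(line))) if (v := tok(i)) is not None)
--         res += 10 * first + last
--     return res
-- ===== Notes on version B (the rewrite author's own statement) =====
-- stated objective: alternative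
-- what changed: Instead of building the full list of all number tokens per line and indexing it at [0] and [-1], B scans each line once from the left for the first token and once from the right for the last token, short-circuiting at the first hit and keeping no intermediate list; Pre_ excludes lines with no token, on which A raises IndexError and B raises StopIteration.
import Mathlib
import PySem

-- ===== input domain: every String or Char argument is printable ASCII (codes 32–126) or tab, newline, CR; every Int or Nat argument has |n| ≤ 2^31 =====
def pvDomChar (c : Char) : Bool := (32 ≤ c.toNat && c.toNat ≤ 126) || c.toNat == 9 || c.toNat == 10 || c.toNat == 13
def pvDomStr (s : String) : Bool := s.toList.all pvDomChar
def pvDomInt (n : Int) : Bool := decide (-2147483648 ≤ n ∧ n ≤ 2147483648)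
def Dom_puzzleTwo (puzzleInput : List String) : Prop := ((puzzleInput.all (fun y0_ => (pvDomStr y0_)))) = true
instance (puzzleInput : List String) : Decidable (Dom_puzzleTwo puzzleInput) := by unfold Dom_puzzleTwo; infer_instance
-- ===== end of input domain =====

-- B replaces A's per-line list of all number tokens (indexed at [0]/[-1]) by two
-- short-circuit directional scans: first token from the left, last token from the right.

-- ===== PORT A =====
def pvWords : List String := ["one", "two", "three", "four", "five", "six", "seven", "eight", "nine"]

-- inner loop 'for val, word in enumerate(words, start=1): if line[i:].startswith(word): append val; break'
def pvScanWords (rest : List Char) : List (Int × String) → Option Int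
  | [] => none
  | (val, word) :: more =>
      if PySem.Chars.startswith rest word.toList then some val else pvScanWords rest more

-- the body of 'for i, c in enumerate(line)', acting on the 'digits' accumulator
def pvStep (cs : List Char) (digits : List Int) (ic : Int × Char) : List Int :=
  if PySem.Chars.isdigit ic.2 then
    digits ++ [((ic.2.toNat : Int) - 48)]   -- int(c): exact, isdigit guarantees '0'..'9'
  else if PySem.Chars.isIn [ic.2] "otfsen".toList then
    match pvScanWords (PySem.List.slice cs (some ic.1) none) (PySem.List.enumerate pvWords 1) with
    | some val => digits ++ [val]
    | none => digits
  else digits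

def pvLineDigits (cs : List Char) : List Int :=
  (PySem.List.enumerate cs 0).foldl (pvStep cs) []

def puzzleTwo (puzzleInput : List String) : Int :=
  puzzleInput.foldl (fun res cs =>
    let digits := pvLineDigits cs.toList
    -- digits[0] / digits[-1]: an IndexError on an empty 'digits' lies outside Pre_
    res + (10 * PySem.List.pyGetD digits 0 0 + PySem.List.pyGetD digits (-1) 0)) 0

-- ===== PORT B =====
def pvWordsB : List String := ["one", "two", "three", "four", "five", "six", "seven", "eight", "nine"]

-- 'for v, w in enumerate(words, 1): if line.startswith(w, i): return v' ; 'return None'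
def pvScanB (cs : List Char) (i : Nat) : List (Int × String) → Option Int
  | [] => none
  | (v, w) :: more =>
      if PySem.Chars.startswith (cs.drop i) w.toList then some v   -- line.startswith(w, i), 0 ≤ i
      else pvScanB cs i more

-- tok(i)
def pvTok (cs : List Char) (i : Nat) : Option Int :=
  match (cs[i]?) with
  | none => none
  | some c =>
      if PySem.Chars.isdigit c then some ((c.toNat : Int) - 48)   -- int(c): exact on '0'..'9'
      else pvScanB cs i (PySem.List.enumerate pvWordsB 1)

-- next(v for i in <indices> if (v := tok(i)) is not None), as a scan over the index list
def pvFirstTok (cs : List Char) : List Nat → Option Int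
  | [] => none
  | i :: rest =>
      match pvTok cs i with
      | some v => some v
      | none => pvFirstTok cs rest

def puzzleTwo_alt (puzzleInput : List String) : Int :=
  puzzleInput.foldl (fun res s =>
    let cs := s.toList
    let first := pvFirstTok cs (List.range cs.length)
    let last := pvFirstTok cs (List.range cs.length).reverse
    -- a StopIteration on a token-free cs lies outside Pre_
    res + (10 * first.getD 0 + last.getD 0)) 0

-- ===== PRECONDITION & SPEC =====
-- Pre_ excludes lines containing neither a digit nor a spelled number word: on those A
-- raises IndexError (digits[0] on an empty list) and B raises StopIteration.
def Pre_puzzleTwo (puzzleInput : List String) : Prop :=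
  (puzzleInput.all (fun s =>
      s.toList.any PySem.Chars.isdigit ||
      (["one", "two", "three", "four", "five", "six", "seven", "eight", "nine"].any
        (fun w => PySem.Chars.isIn w.toList s.toList)))) = true

instance (puzzleInput : List String) : Decidable (Pre_puzzleTwo puzzleInput) := by
  unfold Pre_puzzleTwo; infer_instance

def pvWitness_puzzleTwo : List String := ["two1nine", "eightwone"]

def Spec_puzzleTwo (puzzleInput : List String) (out : Int) : Prop := out = puzzleTwo_alt puzzleInput
instance (puzzleInput : List String) (out : Int) : Decidable (Spec_puzzleTwo puzzleInput out) := by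
  unfold Spec_puzzleTwo; infer_instance

-- ===== CLAIM (what is proved, stated in full; the proofs are below) =====
def Claim_equal_puzzleTwo : Prop := ∀ (puzzleInput : List String), Dom_puzzleTwo puzzleInput → Pre_puzzleTwo puzzleInput → Spec_puzzleTwo puzzleInput (puzzleTwo puzzleInput)

-- ===== LEMMAS AND PROOFS =====

theorem pvScan_eq (cs : List Char) (i : Nat) (l : List (Int × String)) :
    pvScanWords (cs.drop i) l = pvScanB cs i l := by
  induction l with
  | nil => rfl
  | cons p more ih => cases p; simp only [pvScanWords, pvScanB, ih]

theorem pv_sw_false {c d : Char} (t w : List Char) (h : c ≠ d) :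
    PySem.Chars.startswith (c :: t) (d :: w) = false := by
  cases hb : PySem.Chars.startswith (c :: t) (d :: w)
  · rfl
  · exact absurd ((List.cons_prefix_cons.1 ((PySem.Chars.startswith_iff _ _).1 hb)).1).symm h

-- a character outside 'otfsen' starts no number word
theorem pvScanB_none (cs : List Char) (i : Nat) (c : Char) (t : List Char)
    (hd : cs.drop i = c :: t)
    (hc : PySem.Chars.isIn [c] "otfsen".toList = false) :
    pvScanB cs i (PySem.List.enumerate pvWordsB 1) = none := by
  have hne : ∀ d ∈ (['o','t','f','s','e','n'] : List Char), c ≠ d := by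
    intro d hdm hcd
    subst hcd
    have hnotin := (PySem.Chars.isIn_eq_false_iff _ _).1 hc
    obtain ⟨s1, t1, hst⟩ := List.append_of_mem hdm
    exact hnotin ⟨s1, t1, by simpa using hst.symm⟩
  have F : ∀ (d : Char) (w : List Char), d ∈ (['o','t','f','s','e','n'] : List Char) →
      PySem.Chars.startswith (cs.drop i) (d :: w) = false := by
    intro d w hdm; rw [hd]; exact pv_sw_false t w (hne d hdm)
  have he : PySem.List.enumerate pvWordsB 1 =
      [((1:Int),"one"),(2,"two"),(3,"three"),(4,"four"),(5,"five"),(6,"six"),(7,"seven"),(8,"eight"),(9,"nine")] := by rfl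
  rw [he]
  simp only [pvScanB,
    show "one".toList = 'o'::['n','e'] from rfl,
    show "two".toList = 't'::['w','o'] from rfl,
    show "three".toList = 't'::['h','r','e','e'] from rfl,
    show "four".toList = 'f'::['o','u','r'] from rfl,
    show "five".toList = 'f'::['i','v','e'] from rfl,
    show "six".toList = 's'::['i','x'] from rfl,
    show "seven".toList = 's'::['e','v','e','n'] from rfl,
    show "eight".toList = 'e'::['i','g','h','t'] from rfl,
    show "nine".toList = 'n'::['i','n','e'] from rfl,
    F 'o' ['n','e'] (by decide), F 't' ['w','o'] (by decide), F 't' ['h','r','e','e'] (by decide),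
    F 'f' ['o','u','r'] (by decide), F 'f' ['i','v','e'] (by decide), F 's' ['i','x'] (by decide),
    F 's' ['e','v','e','n'] (by decide), F 'e' ['i','g','h','t'] (by decide), F 'n' ['i','n','e'] (by decide)]
  simp

-- one loop-body step of A appends exactly what B's tok yields at that index
theorem pvStep_eq (cs : List Char) (acc : List Int) (i : Nat) (ch : Char)
    (hget : cs[i]? = some ch) (hdrop : cs.drop i = ch :: cs.drop (i + 1)) :
    pvStep cs acc ((i : Int), ch) = acc ++ (pvTok cs i).toList := by
  have hslice : PySem.List.slice cs (some (i : Int)) none = cs.drop i := by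
    rw [PySem.List.slice_from cs (Int.natCast_nonneg i)]
    simp
  have hlit : ("otfsen".toList : List Char) = ['o','t','f','s','e','n'] := rfl
  simp only [pvStep, pvTok, hget, hslice, pvScan_eq, hlit]
  by_cases hdig : PySem.Chars.isdigit ch = true
  · simp [hdig]
  · simp only [hdig, if_false, Bool.false_eq_true]
    by_cases hin : PySem.Chars.isIn [ch] (['o','t','f','s','e','n'] : List Char) = true
    · simp only [hin, if_true]
      have hWW : PySem.List.enumerate pvWords 1 = PySem.List.enumerate pvWordsB 1 := rfl
      rw [hWW]
      cases h : pvScanB cs i (PySem.List.enumerate pvWordsB 1) <;> simp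
    · have hnone := pvScanB_none cs i ch (cs.drop (i + 1)) hdrop (by rw [hlit]; simpa using hin)
      simp [hin, hnone]

theorem pvFilterMap_cons {α β : Type} (f : α → Option β) (a : α) (l : List α) :
    (f a).toList ++ l.filterMap f = (a :: l).filterMap f := by
  cases h : f a <;> simp [h]

theorem pvDigits_aux (cs : List Char) :
    ∀ (suf pre : List Char) (acc : List Int), cs = pre ++ suf →
      (PySem.List.enumerate suf (pre.length : Int)).foldl (pvStep cs) acc
        = acc ++ (List.range' pre.length suf.length).filterMap (pvTok cs) := by
  intro suf
  induction suf with
  | nil => intro pre acc _; simp [PySem.List.enumerate]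
  | cons ch suf' ih =>
      intro pre acc hline
      have hlt : pre.length < cs.length := by
        rw [hline]; simp
      have hget : cs[pre.length]? = some ch := by
        rw [hline, List.getElem?_append_right (Nat.le_refl _)]
        simp
      have hgetE : cs[pre.length]'hlt = ch := by
        have := hget; rwa [List.getElem?_eq_getElem hlt, Option.some_inj] at this
      have hdrop : cs.drop pre.length = ch :: cs.drop (pre.length + 1) := by
        rw [List.drop_eq_getElem_cons hlt, hgetE]
      rw [PySem.List.enumerate_cons, List.foldl_cons,
        pvStep_eq cs acc pre.length ch hget hdrop]
      have hcast : ((pre.length : Int) + 1) = (((pre ++ [ch]).length : Nat) : Int) := by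
        simp
      rw [hcast, ih (pre ++ [ch]) (acc ++ (pvTok cs pre.length).toList) (by rw [hline]; simp)]
      rw [List.length_cons, List.range'_succ, List.append_assoc, List.length_append]
      simp [pvFilterMap_cons]

theorem pvDigits_eq (cs : List Char) :
    pvLineDigits cs = (List.range cs.length).filterMap (pvTok cs) := by
  have := pvDigits_aux cs cs [] [] rfl
  simpa [pvLineDigits, List.range_eq_range'] using this

-- B's directional scans return head?/getLast? of that filterMap
theorem pvFirst_eq (cs : List Char) (l : List Nat) :
    pvFirstTok cs l = (l.filterMap (pvTok cs)).head? := by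
  induction l with
  | nil => rfl
  | cons i rest ih =>
      simp only [pvFirstTok, List.filterMap_cons]
      cases h : pvTok cs i <;> simp [ih]

theorem pvLast_eq (cs : List Char) (l : List Nat) :
    pvFirstTok cs l.reverse = (l.filterMap (pvTok cs)).getLast? := by
  rw [pvFirst_eq, List.filterMap_reverse, List.head?_reverse]

theorem pvScanB_some (cs : List Char) (i : Nat) (l : List (Int × String))
    (h : ∃ p ∈ l, PySem.Chars.startswith (cs.drop i) p.2.toList = true) :
    pvScanB cs i l ≠ none := by
  induction l with
  | nil => obtain ⟨p, hp, _⟩ := h; exact absurd hp (List.not_mem_nil)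
  | cons q more ih =>
      obtain ⟨p, hp, hsw⟩ := h
      obtain ⟨v, w⟩ := q
      simp only [pvScanB]
      rcases List.mem_cons.1 hp with heq | hmem
      · subst heq; rw [hsw]; simp
      · by_cases hq : PySem.Chars.startswith (cs.drop i) w.toList = true
        · rw [hq]; simp
        · simp only [hq, if_false, Bool.false_eq_true]
          exact ih ⟨p, hmem, hsw⟩

-- Pre_'s per-line condition makes the token list nonempty
theorem pv_nonempty (s : String)
    (h : (s.toList.any PySem.Chars.isdigit ||
      (["one", "two", "three", "four", "five", "six", "seven", "eight", "nine"].any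
        (fun w => PySem.Chars.isIn w.toList s.toList))) = true) :
    (List.range s.toList.length).filterMap (pvTok s.toList) ≠ [] := by
  intro hnil
  have hall := List.filterMap_eq_nil_iff.1 hnil
  rcases Bool.or_eq_true_iff.1 h with hdig | hwrd
  · obtain ⟨c, hc, hcd⟩ := List.any_eq_true.1 hdig
    obtain ⟨k, hk, hke⟩ := List.mem_iff_getElem.1 hc
    have : pvTok s.toList k ≠ none := by
      simp [pvTok, List.getElem?_eq_getElem hk, hke, hcd]
    exact this (hall k (List.mem_range.2 hk))
  · obtain ⟨w, hw, hin⟩ := List.any_eq_true.1 hwrd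
    obtain ⟨s1, t1, hst⟩ := (PySem.Chars.isIn_iff_infix _ _).1 hin
    have hdropj : s.toList.drop s1.length = w.toList ++ t1 := by
      rw [← hst, List.append_assoc, List.drop_left]
    have hwlist : ∃ c0 w', w.toList = c0 :: w' := by
      fin_cases hw <;> exact ⟨_, _, rfl⟩
    obtain ⟨c0, w', hwl⟩ := hwlist
    have hj : s1.length < s.toList.length := by
      rw [← hst]; simp [hwl]
    have hgetj : s.toList[s1.length]? = some c0 := by
      rw [← List.head?_drop, hdropj, hwl]; rfl
    have hsw : PySem.Chars.startswith (s.toList.drop s1.length) w.toList = true := by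
      rw [PySem.Chars.startswith_iff, hdropj]
      exact ⟨t1, rfl⟩
    have hmem : ∃ p ∈ PySem.List.enumerate pvWordsB 1,
        PySem.Chars.startswith (s.toList.drop s1.length) p.2.toList = true := by
      fin_cases hw
      · exact ⟨(1, "one"), by decide, hsw⟩
      · exact ⟨(2, "two"), by decide, hsw⟩
      · exact ⟨(3, "three"), by decide, hsw⟩
      · exact ⟨(4, "four"), by decide, hsw⟩
      · exact ⟨(5, "five"), by decide, hsw⟩
      · exact ⟨(6, "six"), by decide, hsw⟩
      · exact ⟨(7, "seven"), by decide, hsw⟩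
      · exact ⟨(8, "eight"), by decide, hsw⟩
      · exact ⟨(9, "nine"), by decide, hsw⟩
    have : pvTok s.toList s1.length ≠ none := by
      simp only [pvTok, hgetj]
      by_cases hdg : PySem.Chars.isdigit c0 = true
      · simp [hdg]
      · simp only [hdg, if_false, Bool.false_eq_true]
        exact pvScanB_some _ _ _ hmem
    exact this (hall s1.length (List.mem_range.2 hj))

-- head/last of a nonempty list, both readings
theorem pvEnds (F : List Int) (hne : F ≠ []) :
    10 * PySem.List.pyGetD F 0 0 + PySem.List.pyGetD F (-1) 0
      = 10 * F.head?.getD 0 + F.getLast?.getD 0 := by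
  rw [PySem.List.pyGetD_neg_one F 0 hne, List.getLast?_eq_some_getLast hne]
  cases F with
  | nil => exact absurd rfl hne
  | cons a t =>
      rw [PySem.List.pyGetD_zero_cons]
      simp

-- per-line equality under Pre_'s line condition
theorem pvLine_eq (s : String)
    (h : (s.toList.any PySem.Chars.isdigit ||
      (["one", "two", "three", "four", "five", "six", "seven", "eight", "nine"].any
        (fun w => PySem.Chars.isIn w.toList s.toList))) = true) :
    10 * PySem.List.pyGetD (pvLineDigits s.toList) 0 0
      + PySem.List.pyGetD (pvLineDigits s.toList) (-1) 0
    = 10 * (pvFirstTok s.toList (List.range s.toList.length)).getD 0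
      + (pvFirstTok s.toList (List.range s.toList.length).reverse).getD 0 := by
  rw [pvDigits_eq, pvFirst_eq, pvLast_eq]
  exact pvEnds _ (pv_nonempty s h)

theorem pvMain (ls : List String) (hp : Pre_puzzleTwo ls) : ∀ (init : Int),
    ls.foldl (fun res cs =>
      let digits := pvLineDigits cs.toList
      res + (10 * PySem.List.pyGetD digits 0 0 + PySem.List.pyGetD digits (-1) 0)) init
    = ls.foldl (fun res s =>
      let cs := s.toList
      let first := pvFirstTok cs (List.range cs.length)
      let last := pvFirstTok cs (List.range cs.length).reverse
      res + (10 * first.getD 0 + last.getD 0)) init := by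
  induction ls with
  | nil => intro init; rfl
  | cons s rest ih =>
      intro init
      rw [Pre_puzzleTwo, List.all_cons, Bool.and_eq_true] at hp
      obtain ⟨hs, hrest⟩ := hp
      simp only [List.foldl_cons]
      rw [pvLine_eq s hs]
      exact ih hrest _

-- ===== VERDICT (by name: the statement is the Claim_ definition above) =====
theorem puzzleTwo_spec : Claim_equal_puzzleTwo := by
  intro puzzleInput _ hpre
  show puzzleTwo puzzleInput = puzzleTwo_alt puzzleInput
  exact pvMain puzzleInput hpre 0
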